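-- pv_equiv track=rewrite | github.com/fabiofalopes/analizer | py_analizer/old_scripts/main3.py | divide_content
-- ===== SOURCE A (Python) =====
-- def divide_content(content, encoded_tokens, num_parts):
--     tokens_per_part = len(encoded_tokens) // num_parts
--     chunks = []
--     start = 0
--     for i in range(num_parts):
--         end_index = start + tokens_per_part
--         if i == num_parts - 1:  # last chunk includes remainder
--             end_index = len(encoded_tokens)
--         chunk_tokens = encoded_tokens[start:end_index]
--         chunks.append(content[start:end_index])
--         start = end_index
--     return chunks
-- ===== SOURCE B (Python) =====
-- def divide_content(content, encoded_tokens, num_parts):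
--     tokens_per_part = len(encoded_tokens) // num_parts
--
--     def split(s, k):
--         # s carries exactly the text for k consecutive chunks; halve the chunk count
--         if k == 1:
--             return [s]
--         half = k // 2
--         return split(s[:half * tokens_per_part], half) + split(s[half * tokens_per_part:], k - half)
--
--     if num_parts <= 0:
--         return []
--     return split(content[:len(encoded_tokens)], num_parts)
-- ===== Notes on version B (the rewrite author's own statement) =====
-- stated objective: alternative
-- what changed: Replaces A's left-to-right loop with a running start index by a divide-and-conquer split: content is first trimmed to the token length, then a recursive helper halves the chunk count, slicing the string into a left part carrying half the chunks and a right part carrying the rest, down to single-chunk leaves; no running accumulator, no last-chunk branch, and the unused chunk_tokens slice is gone.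
import Mathlib
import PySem

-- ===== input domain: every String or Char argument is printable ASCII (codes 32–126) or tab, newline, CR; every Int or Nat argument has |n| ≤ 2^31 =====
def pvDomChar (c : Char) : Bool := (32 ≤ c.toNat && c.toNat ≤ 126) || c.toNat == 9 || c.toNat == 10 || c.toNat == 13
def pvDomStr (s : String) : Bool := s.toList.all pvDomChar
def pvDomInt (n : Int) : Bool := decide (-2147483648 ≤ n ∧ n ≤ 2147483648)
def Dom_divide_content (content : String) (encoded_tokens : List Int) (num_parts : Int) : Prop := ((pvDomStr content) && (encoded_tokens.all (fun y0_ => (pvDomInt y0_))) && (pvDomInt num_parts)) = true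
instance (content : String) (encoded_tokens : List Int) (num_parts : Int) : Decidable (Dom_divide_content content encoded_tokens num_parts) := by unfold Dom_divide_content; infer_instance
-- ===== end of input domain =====

-- B divides the trimmed content by recursive halving of the chunk count (divide and conquer)
-- instead of A's left-to-right loop with a running start index; return-value equivalence (objective: alternative).


-- ===== PORT A =====
def divide_content (content : String) (encoded_tokens : List Int) (num_parts : Int) : List String :=
  let tokens_per_part : Int := PySem.Int.floordiv (encoded_tokens.length : Int) num_parts
  let st := (PySem.List.pyRange 0 num_parts 1).foldl
    (fun (st : List String × Int) i =>
      let end_index0 := st.2 + tokens_per_part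
      let end_index := if i = num_parts - 1 then (encoded_tokens.length : Int) else end_index0
      let _chunk_tokens := PySem.List.slice encoded_tokens (some st.2) (some end_index)  -- unused, as in A
      (st.1 ++ [PySem.Str.slice content (some st.2) (some end_index)], end_index))
    ([], 0)
  st.1

-- ===== PORT B =====
-- Source B's inner helper 'split'; the 'k ≤ 1' guard (Python tests 'k == 1', and split is only ever
-- called with k ≥ 1) merely makes the recursion total in Lean.
def pvSplit (tokens_per_part : Int) (s : String) (k : Int) : List String :=
  if k ≤ 1 then [s]
  else
    let half := PySem.Int.floordiv k 2
    pvSplit tokens_per_part (PySem.Str.slice s none (some (half * tokens_per_part))) half ++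
    pvSplit tokens_per_part (PySem.Str.slice s (some (half * tokens_per_part)) none) (k - half)
termination_by k.toNat
decreasing_by
  all_goals
    have h := (PySem.Int.floordiv_eq_iff_of_pos (by norm_num : (0:Int) < 2)).mp
      (rfl : PySem.Int.floordiv k 2 = PySem.Int.floordiv k 2)
    omega

def divide_content_alt (content : String) (encoded_tokens : List Int) (num_parts : Int) : List String :=
  let tokens_per_part : Int := PySem.Int.floordiv (encoded_tokens.length : Int) num_parts
  if num_parts ≤ 0 then []
  else pvSplit tokens_per_part
        (PySem.Str.slice content none (some (encoded_tokens.length : Int))) num_parts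

-- ===== PRECONDITION & SPEC =====
-- Pre_ excludes exactly num_parts = 0, where A raises ZeroDivisionError.
def Pre_divide_content (content : String) (encoded_tokens : List Int) (num_parts : Int) : Prop := num_parts ≠ 0
instance (content : String) (encoded_tokens : List Int) (num_parts : Int) : Decidable (Pre_divide_content content encoded_tokens num_parts) := by unfold Pre_divide_content; infer_instance
def pvWitness_divide_content : String × List Int × Int := ("abcd", [1, 2, 3], 2)

def Spec_divide_content (content : String) (encoded_tokens : List Int) (num_parts : Int) (out : List String) : Prop := out = divide_content_alt content encoded_tokens num_parts
instance (content : String) (encoded_tokens : List Int) (num_parts : Int) (out : List String) : Decidable (Spec_divide_content content encoded_tokens num_parts out) := by unfold Spec_divide_content; infer_instance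

-- ===== CLAIM (what is proved, stated in full; the proofs are below) =====
def Claim_equal_divide_content : Prop := ∀ (content : String) (encoded_tokens : List Int) (num_parts : Int), Dom_divide_content content encoded_tokens num_parts → Pre_divide_content content encoded_tokens num_parts → Spec_divide_content content encoded_tokens num_parts (divide_content content encoded_tokens num_parts)

-- ===== LEMMAS AND PROOFS =====

-- slicing a front slice, bounded stop: (s[c:])[a:b] = s[c+a:c+b] for nonnegative c, a, b
theorem pv_slice_shift (s : String) (c a b : Int) (hc : 0 ≤ c) (ha : 0 ≤ a) (hb : 0 ≤ b) :
    PySem.Str.slice (PySem.Str.slice s (some c) none) (some a) (some b)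
      = PySem.Str.slice s (some (c + a)) (some (c + b)) := by
  simp only [PySem.Str.slice, PySem.Chars.slice, String.toList_ofList]
  rw [PySem.List.slice_from _ hc, PySem.List.slice_toNat _ ha hb,
      PySem.List.slice_toNat _ (by omega : (0:Int) ≤ c+a) (by omega : (0:Int) ≤ c+b),
      List.drop_drop,
      show c.toNat + a.toNat = (c+a).toNat by omega,
      show (c+b).toNat - (c+a).toNat = b.toNat - a.toNat by omega]

-- (s[:n])[a:b] = s[a:b] when 0 ≤ a, 0 ≤ b ≤ n
theorem pv_slice_take (s : String) (n a b : Int) (ha : 0 ≤ a) (hb : 0 ≤ b) (hbn : b ≤ n) :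
    PySem.Str.slice (PySem.Str.slice s none (some n)) (some a) (some b)
      = PySem.Str.slice s (some a) (some b) := by
  have hn : 0 ≤ n := le_trans hb hbn
  simp only [PySem.Str.slice, PySem.Chars.slice, String.toList_ofList]
  rw [PySem.List.slice_to _ hn, PySem.List.slice_toNat _ ha hb, PySem.List.slice_toNat _ ha hb,
      List.drop_take, List.take_take,
      show min (b.toNat - a.toNat) (n.toNat - a.toNat) = b.toNat - a.toNat by omega]

-- (s[:n])[a:] = s[a:n] when 0 ≤ a ≤ n
theorem pv_slice_take_from (s : String) (n a : Int) (ha : 0 ≤ a) (han : a ≤ n) :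
    PySem.Str.slice (PySem.Str.slice s none (some n)) (some a) none
      = PySem.Str.slice s (some a) (some n) := by
  have hn : 0 ≤ n := le_trans ha han
  simp only [PySem.Str.slice, PySem.Chars.slice, String.toList_ofList]
  rw [PySem.List.slice_to _ hn, PySem.List.slice_from _ ha,
      PySem.List.slice_toNat _ ha hn, List.drop_take]

-- (s[c:])[a:] = s[c+a:] for nonnegative c, a
theorem pv_slice_drop_from (s : String) (c a : Int) (hc : 0 ≤ c) (ha : 0 ≤ a) :
    PySem.Str.slice (PySem.Str.slice s (some c) none) (some a) none
      = PySem.Str.slice s (some (c + a)) none := by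
  simp only [PySem.Str.slice, PySem.Chars.slice, String.toList_ofList]
  rw [PySem.List.slice_from _ hc, PySem.List.slice_from _ ha,
      PySem.List.slice_from _ (by omega : (0:Int) ≤ c + a), List.drop_drop,
      show c.toNat + a.toNat = (c+a).toNat by omega]

-- A's prefix loop invariant: before the last iteration, start = m * tpp and the chunks are the map
theorem pv_prefix (content : String) (encoded_tokens : List Int) (num_parts tpp : Int)
    (m : Nat) (hm : (m : Int) ≤ num_parts - 1) :
    (PySem.List.pyRange 0 (m : Int) 1).foldl
      (fun (st : List String × Int) i =>
        let end_index0 := st.2 + tpp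
        let end_index := if i = num_parts - 1 then (encoded_tokens.length : Int) else end_index0
        let _chunk_tokens := PySem.List.slice encoded_tokens (some st.2) (some end_index)
        (st.1 ++ [PySem.Str.slice content (some st.2) (some end_index)], end_index))
      ([], 0)
    = ((PySem.List.pyRange 0 (m : Int) 1).map
        (fun i => PySem.Str.slice content (some (i * tpp)) (some ((i + 1) * tpp))),
       (m : Int) * tpp) := by
  induction m with
  | zero => simp [PySem.List.pyRange_one_eq_nil]
  | succ k ih =>
    have hk : (k : Int) ≤ num_parts - 1 := by push_cast at hm ⊢; omega
    have hne : (k : Int) ≠ num_parts - 1 := by push_cast at hm; omega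
    have hsplit : PySem.List.pyRange 0 ((k + 1 : Nat) : Int) 1
        = PySem.List.pyRange 0 (k : Int) 1 ++ [(k : Int)] := by
      have := PySem.List.pyRange_one_succ_right (a := 0) (b := (k : Int)) (by positivity)
      push_cast
      push_cast at this
      exact this
    rw [hsplit, List.foldl_append, ih hk, List.map_append]
    simp only [List.foldl_cons, List.foldl_nil, List.map_cons, List.map_nil, if_neg hne]
    rw [show ((k : Int)) * tpp + tpp = ((k : Int) + 1) * tpp by ring,
        show (((k + 1 : Nat)) : Int) * tpp = ((k : Int) + 1) * tpp by push_cast; ring]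

-- B's halving recursion, characterised as absolute-index slices of its argument string
theorem pv_split (t : Int) (ht : 0 ≤ t) :
    ∀ (k : Nat), 1 ≤ k → ∀ (s : String),
    pvSplit t s (k : Int)
      = (List.range (k - 1)).map
          (fun i : Nat => PySem.Str.slice s (some ((i : Int) * t)) (some (((i : Int) + 1) * t)))
        ++ [PySem.Str.slice s (some (((k : Int) - 1) * t)) none] := by
  intro k
  induction k using Nat.strong_induction_on with
  | _ k ih =>
    intro hk s
    by_cases h1 : k = 1
    · subst h1
      rw [pvSplit]
      norm_num [PySem.Str.slice, PySem.Chars.slice]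
    · have hk2 : 2 ≤ k := by omega
      set j : Nat := k / 2 with hj
      have hjb : 1 ≤ j ∧ j < k := by omega
      have hhalf : PySem.Int.floordiv (k : Int) 2 = (j : Int) := by
        rw [PySem.Int.floordiv_eq_iff_of_pos (by norm_num : (0:Int) < 2)]
        constructor <;> omega
      rw [pvSplit, if_neg (by omega : ¬ ((k : Nat) : Int) ≤ 1)]
      simp only [hhalf]
      rw [show ((k : Nat) : Int) - (j : Int) = ((k - j : Nat) : Int) by omega]
      rw [ih j hjb.2 hjb.1, ih (k - j) (by omega) (by omega)]
      -- convert left-half slices to slices of s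
      have hL : (List.range (j - 1)).map
          (fun i : Nat => PySem.Str.slice (PySem.Str.slice s none (some ((j : Int) * t)))
            (some ((i : Int) * t)) (some (((i : Int) + 1) * t)))
          = (List.range (j - 1)).map
            (fun i : Nat => PySem.Str.slice s (some ((i : Int) * t)) (some (((i : Int) + 1) * t))) := by
        refine List.map_congr_left (fun i hi => ?_)
        have hi' : i < j - 1 := List.mem_range.mp hi
        exact pv_slice_take s ((j : Int) * t) ((i : Int) * t) (((i : Int) + 1) * t)
          (by positivity) (by positivity)
          (mul_le_mul_of_nonneg_right (by omega : ((i : Int) + 1) ≤ (j : Int)) ht)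
      have hLl : PySem.Str.slice (PySem.Str.slice s none (some ((j : Int) * t)))
          (some (((j : Int) - 1) * t)) none
          = PySem.Str.slice s (some ((((j - 1 : Nat)) : Int) * t))
              (some (((((j - 1 : Nat)) : Int) + 1) * t)) := by
        rw [pv_slice_take_from s ((j : Int) * t) (((j : Int) - 1) * t)
          (mul_nonneg (by have := hjb.1; omega : (0:Int) ≤ (j : Int) - 1) ht)
          (mul_le_mul_of_nonneg_right (by omega : (j : Int) - 1 ≤ (j : Int)) ht)]
        rw [show (((j - 1 : Nat)) : Int) = (j : Int) - 1 by have := hjb.1; omega]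
        congr 2 <;> ring
      have hR : (List.range (k - j - 1)).map
          (fun i : Nat => PySem.Str.slice (PySem.Str.slice s (some ((j : Int) * t)) none)
            (some ((i : Int) * t)) (some (((i : Int) + 1) * t)))
          = (List.range (k - 1 - j)).map
            ((fun i : Nat => PySem.Str.slice s (some ((i : Int) * t)) (some (((i : Int) + 1) * t)))
              ∘ (fun x => j + x)) := by
        rw [show k - j - 1 = k - 1 - j by omega]
        refine List.map_congr_left (fun i _ => ?_)
        rw [pv_slice_shift s ((j : Int) * t) ((i : Int) * t) (((i : Int) + 1) * t)
          (by positivity) (by positivity) (by positivity)]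
        simp only [Function.comp]
        congr 2 <;> push_cast <;> ring
      have hRl : PySem.Str.slice (PySem.Str.slice s (some ((j : Int) * t)) none)
          (some ((((k - j : Nat) : Int) - 1) * t)) none
          = PySem.Str.slice s (some (((k : Int) - 1) * t)) none := by
        rw [pv_slice_drop_from s ((j : Int) * t) ((((k - j : Nat) : Int) - 1) * t)
          (mul_nonneg (Int.natCast_nonneg j) ht)
          (mul_nonneg (by have := hjb.2; omega : (0:Int) ≤ ((k - j : Nat) : Int) - 1) ht)]
        congr 2
        have : ((k - j : Nat) : Int) = (k : Int) - (j : Int) := by omega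
        rw [this]; ring
      rw [hL, hLl, hR, hRl]
      -- decompose the target range
      have hrange : List.range (k - 1) = (List.range (j - 1) ++ [j - 1])
          ++ (List.range (k - 1 - j)).map (fun x => j + x) := by
        have h1 : List.range j = List.range (j - 1) ++ [j - 1] := by
          conv_lhs => rw [show j = (j - 1) + 1 by omega]
          rw [List.range_succ]
        set r := k - 1 - j with hrdef
        rw [show k - 1 = j + r by omega, List.range_add, h1]
      rw [hrange]
      simp [List.map_append, List.append_assoc]

-- ===== VERDICT (by name: the statement is the Claim_ definition above) =====
theorem divide_content_spec : Claim_equal_divide_content := by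
  intro content encoded_tokens num_parts _ hpre
  unfold Spec_divide_content divide_content divide_content_alt
  rcases lt_trichotomy num_parts 0 with hneg | hz | hpos
  · -- both empty
    simp [PySem.List.pyRange_one_eq_nil (le_of_lt hneg), le_of_lt hneg]
  · exact absurd hz hpre
  · -- num_parts ≥ 1
    set L : Int := (encoded_tokens.length : Int) with hL
    set tpp : Int := PySem.Int.floordiv L num_parts with htpp
    have hbounds : tpp * num_parts ≤ L ∧ L < (tpp + 1) * num_parts :=
      (PySem.Int.floordiv_eq_iff_of_pos hpos).mp rfl
    have hLnn : 0 ≤ L := by positivity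
    have ht : 0 ≤ tpp := by nlinarith [hbounds.1, hbounds.2]
    obtain ⟨m, hm⟩ : ∃ m : Nat, num_parts = (m : Int) + 1 :=
      ⟨(num_parts - 1).toNat, by omega⟩
    have hmt : ((m : Int) + 1) * tpp ≤ L := by
      calc ((m : Int) + 1) * tpp = tpp * num_parts := by rw [hm]; ring
        _ ≤ L := hbounds.1
    have hsplit : PySem.List.pyRange 0 num_parts 1
        = PySem.List.pyRange 0 ((m : Int)) 1 ++ [(m : Int)] := by
      rw [hm]; exact PySem.List.pyRange_one_succ_right (a := 0) (b := (m : Int)) (by positivity)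
    simp only
    rw [if_neg (by omega : ¬ num_parts ≤ 0)]
    rw [hsplit, List.foldl_append,
        pv_prefix content encoded_tokens num_parts tpp m (by omega)]
    rw [show num_parts = ((m + 1 : Nat) : Int) by push_cast; omega]
    rw [pv_split tpp ht (m + 1) (by omega)]
    simp only [List.foldl_cons, List.foldl_nil,
      if_pos (by push_cast; omega : (m : Int) = ((m + 1 : Nat) : Int) - 1),
      Nat.add_sub_cancel]
    -- convert B's slices of the trimmed string into slices of content
    have hBmap : (List.range m).map
        (fun i : Nat => PySem.Str.slice (PySem.Str.slice content none (some L))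
          (some ((i : Int) * tpp)) (some (((i : Int) + 1) * tpp)))
        = (List.range m).map
          (fun i : Nat => PySem.Str.slice content (some ((i : Int) * tpp)) (some (((i : Int) + 1) * tpp))) := by
      refine List.map_congr_left (fun i hi => ?_)
      have hi' : i < m := List.mem_range.mp hi
      refine pv_slice_take content L ((i : Int) * tpp) (((i : Int) + 1) * tpp)
        (by positivity) (by positivity) ?_
      calc ((i : Int) + 1) * tpp ≤ ((m : Int) + 1) * tpp :=
            mul_le_mul_of_nonneg_right (by omega) ht
        _ ≤ L := hmt
    have hBlast : PySem.Str.slice (PySem.Str.slice content none (some L))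
        (some ((((m + 1 : Nat) : Int) - 1) * tpp)) none
        = PySem.Str.slice content (some ((m : Int) * tpp)) (some L) := by
      rw [show (((m + 1 : Nat) : Int) - 1) = (m : Int) by push_cast; ring]
      refine pv_slice_take_from content L ((m : Int) * tpp) (by positivity) ?_
      nlinarith [hmt, ht]
    rw [hBmap, hBlast]
    rw [PySem.List.pyRange_one 0 (m : Int)]
    simp only [sub_zero, Int.toNat_natCast, List.map_map]
    congr 1
    refine List.map_congr_left (fun i _ => ?_)
    simp [Function.comp]
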